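-- pv_equiv track=rewrite | github.com/carpetpapi/home3.1.2 | stage2.py | encode_instruction
-- ===== SOURCE A (Python) =====
-- from typing import List, Dict
--
-- def encode_instruction(entry: Dict) -> List[int]:
--     A = entry['A'] & 0x7F
--     B = entry['B']
--     size = entry['size']
--     word = (B << 7) | A
--     out = []
--     for i in range(size):
--         out.append((word >> (i * 8)) & 0xFF)
--     return out
-- ===== SOURCE B (Python) =====
-- from typing import List, Dict
--
-- def encode_instruction(entry: Dict) -> List[int]:
--     word = (entry['B'] << 7) | (entry['A'] & 0x7F)
--     size = entry['size']
--
--     # divide and conquer: split the word into low/high halves and serialize each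
--     def le_bytes(w: int, n: int) -> List[int]:
--         if n <= 0:
--             return []
--         if n == 1:
--             return [w % 256]
--         h = n // 2
--         hi, lo = divmod(w, 1 << (8 * h))
--         return le_bytes(lo, h) + le_bytes(hi, n - h)
--
--     return le_bytes(word, size)
-- ===== Notes on version B (the rewrite author's own statement) =====
-- stated objective: alternative
-- what changed: Replaces A's linear indexed shift-and-mask loop with a recursive divide-and-conquer serializer that splits the word into low/high halves by divmod at a power of 256 and concatenates the two recursively serialized halves.
import Mathlib
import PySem

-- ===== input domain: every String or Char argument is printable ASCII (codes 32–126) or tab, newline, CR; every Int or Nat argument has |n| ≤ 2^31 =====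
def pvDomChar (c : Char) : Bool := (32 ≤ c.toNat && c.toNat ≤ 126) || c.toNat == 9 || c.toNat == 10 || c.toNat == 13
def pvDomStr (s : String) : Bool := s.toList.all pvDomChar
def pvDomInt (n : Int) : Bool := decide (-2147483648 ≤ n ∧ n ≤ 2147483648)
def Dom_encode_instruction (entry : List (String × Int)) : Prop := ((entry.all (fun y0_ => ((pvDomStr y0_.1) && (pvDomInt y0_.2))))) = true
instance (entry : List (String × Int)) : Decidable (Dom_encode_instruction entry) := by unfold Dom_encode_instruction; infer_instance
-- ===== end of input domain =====

-- B replaces A's linear indexed shift-and-mask loop by a divide-and-conquer divmod split of the word into halves; return value only, no mutation.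

-- ===== PORT A =====
-- dict lookup entry[k]: first match in the association list (none = KeyError)
def pyLookupA (entry : List (String × Int)) (k : String) : Option Int :=
  (entry.find? (fun p => p.1 == k)).map (·.2)

def encode_instruction (entry : List (String × Int)) : List Int :=
  match pyLookupA entry "A", pyLookupA entry "B", pyLookupA entry "size" with
  | some a, some b, some size =>
    let A := PySem.Int.band a 0x7F
    let word := PySem.Int.bor (b <<< (7 : Nat)) A
    (PySem.List.pyRange 0 size 1).foldl
      (fun out i => out ++ [PySem.Int.band (word >>> (i * 8).toNat) 0xFF]) []
  | _, _, _ => []  -- unreachable under Pre_ (KeyError)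

-- ===== PORT B =====
def pyLookupB (entry : List (String × Int)) (k : String) : Option Int :=
  match entry with
  | [] => none
  | (k', v) :: rest => if k' == k then some v else pyLookupB rest k

-- Source B's le_bytes: divide and conquer; divmod(w, 1<<(8*h)) with positive divisor
def leBytes (w n : Int) : List Int :=
  if _h0 : n ≤ 0 then []
  else if _h1 : n = 1 then [PySem.Int.mod w 256]
  else
    let h := PySem.Int.floordiv n 2
    let d := (1 : Int) <<< (8 * h).toNat
    leBytes (PySem.Int.mod w d) h ++ leBytes (PySem.Int.floordiv w d) (n - h)
termination_by n.toNat
decreasing_by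
  all_goals
    rw [PySem.Int.floordiv_eq_ediv_of_pos (by norm_num : (0:Int) < 2)]
    omega

def encode_instruction_alt (entry : List (String × Int)) : List Int :=
  match pyLookupB entry "A" with
  | none => []  -- unreachable under Pre_ (KeyError)
  | some a =>
    match pyLookupB entry "B" with
    | none => []  -- unreachable under Pre_ (KeyError)
    | some b =>
      match pyLookupB entry "size" with
      | none => []  -- unreachable under Pre_ (KeyError)
      | some size =>
        let word := PySem.Int.bor (b <<< (7 : Nat)) (PySem.Int.band a 0x7F)
        leBytes word size

-- ===== PRECONDITION & SPEC =====
-- A raises KeyError iff one of the keys 'A', 'B', 'size' is absent; Pre_ excludes exactly that.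
def Pre_encode_instruction (entry : List (String × Int)) : Prop :=
  ((entry.find? (fun p => p.1 == "A")).isSome) ∧ ((entry.find? (fun p => p.1 == "B")).isSome) ∧ ((entry.find? (fun p => p.1 == "size")).isSome)
instance (entry : List (String × Int)) : Decidable (Pre_encode_instruction entry) := by
  unfold Pre_encode_instruction; infer_instance
def pvWitness_encode_instruction : (List (String × Int)) := [("A", 5), ("B", -3), ("size", 2)]

def Spec_encode_instruction (entry : List (String × Int)) (out : List Int) : Prop := out = encode_instruction_alt entry
instance (entry : List (String × Int)) (out : List Int) : Decidable (Spec_encode_instruction entry out) := by unfold Spec_encode_instruction; infer_instance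

-- ===== CLAIM (what is proved, stated in full; the proofs are below) =====
def Claim_equal_encode_instruction : Prop := ∀ (entry : List (String × Int)), Dom_encode_instruction entry → Pre_encode_instruction entry → Spec_encode_instruction entry (encode_instruction entry)

-- ===== LEMMAS AND PROOFS =====

-- reference linear little-endian digit expansion (proof-only)
def toBytesLE : Nat → Int → List Int
  | 0, _ => []
  | n + 1, w => (w % 256) :: toBytesLE n (w / 256)

-- Python's  w & (2^k - 1)  is  w mod 2^k,  for every (also negative) w
lemma band_mask (w : Int) (k : Nat) : PySem.Int.band w (2 ^ k - 1) = w % 2 ^ k := by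
  have hc : ((2:Int) ^ k) = ((2 ^ k : Nat) : Int) := by push_cast; ring
  have hm : (1:Nat) ≤ 2 ^ k := Nat.one_le_two_pow
  unfold PySem.Int.band
  by_cases hw : 0 ≤ w
  · rw [if_pos hw, if_pos (by omega : (0:Int) ≤ 2 ^ k - 1)]
    have h1 : ((2:Int) ^ k - 1).toNat = 2 ^ k - 1 := by omega
    rw [h1, Nat.and_two_pow_sub_one_eq_mod]
    have h2 : w = ((w.toNat : Nat) : Int) := by omega
    rw [hc, h2]
    push_cast
    simp
  · rw [if_neg hw, if_pos (by omega : (0:Int) ≤ 2 ^ k - 1)]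
    have h1 : ((2:Int) ^ k - 1).toNat = 2 ^ k - 1 := by omega
    rw [Nat.and_comm, h1, Nat.and_two_pow_sub_one_eq_mod]
    set M : Nat := 2 ^ k with hM
    set r : Nat := (-w - 1).toNat % M with hr
    have hrM : r < M := Nat.mod_lt _ (by omega)
    have hri : (r : Int) = (-w - 1) % (M : Int) := by
      rw [hr]; push_cast; congr 1; omega
    have heq : -w - 1 = (M:Int) * ((-w - 1) / (M:Int)) + r := by
      rw [hri]; exact (Int.mul_ediv_add_emod _ _).symm
    have hw' : w = ((M:Int) - 1 - r) + (M : Int) * (-((-w-1)/(M:Int)) - 1) := by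
      linear_combination -heq
    have key : w % (M : Int) = (M : Int) - 1 - r := by
      rw [hw', Int.add_mul_emod_self_left]
      exact Int.emod_eq_of_lt (by omega) (by omega)
    rw [hc, key]
    omega

lemma emod_mul_ediv (w m : Int) : (w % (m * 256)) / 256 = (w / 256) % m := by
  rw [Int.emod_def, Int.emod_def]
  have h1 : w / 256 / m = w / (256 * m) := Int.ediv_ediv_of_nonneg (by norm_num)
  have h2 : w - m * 256 * (w / (m * 256)) = w + (-(m * (w / (m * 256)))) * 256 := by ring
  rw [h2, Int.add_mul_ediv_right _ _ (by norm_num : (256:Int) ≠ 0), h1, mul_comm 256 m]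
  ring

-- digits only depend on the word modulo 2^(8n)
lemma toBytesLE_mod (n : Nat) (w : Int) :
    toBytesLE n (w % 2 ^ (8 * n)) = toBytesLE n w := by
  induction n generalizing w with
  | zero => rfl
  | succ n ih =>
    have hpow : (2:Int) ^ (8 * (n + 1)) = 2 ^ (8 * n) * 256 := by ring
    simp only [toBytesLE]
    congr 1
    · rw [hpow, Int.emod_emod_of_dvd _ ⟨2 ^ (8*n), by ring⟩]
    · rw [hpow, emod_mul_ediv, ih]

-- concatenation of digit blocks
lemma toBytesLE_split (a b : Nat) (w : Int) :
    toBytesLE (a + b) w = toBytesLE a w ++ toBytesLE b (w / 2 ^ (8 * a)) := by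
  induction a generalizing w with
  | zero => simp [toBytesLE]
  | succ a ih =>
    have h1 : a + 1 + b = (a + b) + 1 := by ring
    rw [h1]
    simp only [toBytesLE, ih, List.cons_append]
    congr 2
    rw [Int.ediv_ediv_of_nonneg (by norm_num : (0:Int) ≤ 256)]
    congr 1
    ring_nf

-- B's divide-and-conquer equals the linear expansion
lemma leBytes_eq_aux (k : Nat) : ∀ (n w : Int), n.toNat ≤ k → leBytes w n = toBytesLE n.toNat w := by
  induction k with
  | zero =>
    intro n w hk
    rw [leBytes]
    have h0 : n ≤ 0 := by omega
    rw [dif_pos h0]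
    have : n.toNat = 0 := by omega
    rw [this]; rfl
  | succ k ih =>
    intro n w hk
    rw [leBytes]
    by_cases h0 : n ≤ 0
    · rw [dif_pos h0]
      have : n.toNat = 0 := by omega
      rw [this]; rfl
    · rw [dif_neg h0]
      by_cases h1 : n = 1
      · rw [dif_pos h1, h1]
        show _ = toBytesLE 1 w
        simp only [toBytesLE]
        rw [PySem.Int.mod_eq_emod_of_pos (by norm_num : (0:Int) < 256)]
      · rw [dif_neg h1]
        have hh : PySem.Int.floordiv n 2 = n / 2 :=
          PySem.Int.floordiv_eq_ediv_of_pos (by norm_num)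
        simp only [hh]
        have hn2 : 2 ≤ n := by omega
        have hhb : 1 ≤ n / 2 ∧ n / 2 < n := by omega
        have hd : ((1:Int) <<< (8 * (n / 2)).toNat) = 2 ^ (8 * (n / 2).toNat) := by
          rw [Int.shiftLeft_eq, one_mul]
          congr 1
          omega
        have hdpos : (0:Int) < 2 ^ (8 * (n / 2).toNat) := by positivity
        rw [hd, PySem.Int.mod_eq_emod_of_pos hdpos, PySem.Int.floordiv_eq_ediv_of_pos hdpos]
        rw [ih _ _ (by omega), ih _ _ (by omega)]
        rw [toBytesLE_mod]
        have hsum : n.toNat = (n / 2).toNat + (n - n / 2).toNat := by omega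
        rw [hsum, toBytesLE_split]

lemma leBytes_eq (n w : Int) : leBytes w n = toBytesLE n.toNat w :=
  leBytes_eq_aux n.toNat n w le_rfl

-- A's byte-extraction loop computes exactly the little-endian digits of the word
lemma main_digits (n : Nat) (w : Int) :
    (List.range n).map (fun (i : Nat) => PySem.Int.band (w >>> (i * 8)) 0xFF)
      = toBytesLE n w := by
  induction n generalizing w with
  | zero => simp [toBytesLE]
  | succ n ih =>
    rw [List.range_succ_eq_map, List.map_cons, List.map_map, toBytesLE]
    congr 1
    · have h255 : (0xFF : Int) = 2 ^ (8:Nat) - 1 := by norm_num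
      rw [Nat.zero_mul, Int.shiftRight_zero, h255, band_mask]
      norm_num
    · have hfun : ((fun (i : Nat) => PySem.Int.band (w >>> (i * 8)) 0xFF) ∘ Nat.succ)
          = (fun (i : Nat) => PySem.Int.band ((w >>> (8:Nat)) >>> (i * 8)) 0xFF) := by
        funext i
        simp only [Function.comp]
        rw [← Int.shiftRight_add]
        congr 2
        omega
      rw [hfun, ih]
      congr 1
      rw [Int.shiftRight_eq_div_pow]
      norm_num

lemma pyLookupB_eq (entry : List (String × Int)) (k : String) :
    pyLookupB entry k = (entry.find? (fun p => p.1 == k)).map (·.2) := by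
  induction entry with
  | nil => rfl
  | cons p rest ih =>
    obtain ⟨k', v⟩ := p
    by_cases h : k' == k
    · simp [pyLookupB, List.find?, h]
    · simp [pyLookupB, List.find?, h, ih]

-- ===== VERDICT (by name: the statement is the Claim_ definition above) =====
theorem encode_instruction_spec : Claim_equal_encode_instruction := by
  unfold Claim_equal_encode_instruction
  intro entry _ hpre
  obtain ⟨hA, hB, hS⟩ := hpre
  obtain ⟨pA, hpA⟩ := Option.isSome_iff_exists.mp hA
  obtain ⟨pB, hpB⟩ := Option.isSome_iff_exists.mp hB
  obtain ⟨pS, hpS⟩ := Option.isSome_iff_exists.mp hS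
  unfold Spec_encode_instruction encode_instruction encode_instruction_alt pyLookupA
  simp only [pyLookupB_eq]
  rw [hpA, hpB, hpS]
  simp only [Option.map_some]
  set a := pA.2
  set b := pB.2
  set size := pS.2
  set word := PySem.Int.bor (b <<< (7 : Nat)) (PySem.Int.band a 0x7F) with hword
  rw [leBytes_eq]
  by_cases hs : size ≤ 0
  · rw [PySem.List.pyRange_one_eq_nil hs]
    have : size.toNat = 0 := by omega
    rw [this]
    rfl
  · rw [not_le] at hs
    rw [PySem.List.pyRange_one]
    rw [PySem.List.foldl_append_singleton_eq_map, List.nil_append, List.map_map]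
    have hfun : ((fun i => PySem.Int.band (word >>> (i * 8).toNat) 0xFF) ∘ (fun (k : Nat) => (0:Int) + k))
        = (fun (k : Nat) => PySem.Int.band (word >>> (k * 8)) 0xFF) := by
      funext k
      simp only [Function.comp]
      rw [Int.shiftRight_natCast_right]
      congr 2
      omega
    have hsz : (size - 0).toNat = size.toNat := by omega
    rw [hfun, hsz, main_digits]
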